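-- pv_equiv track=rewrite | github.com/PaulSz7/crossword_generator | crossword/data/normalization.py | display_form
-- ===== SOURCE A (Python) =====
-- def display_form(surface: str, word_breaks: tuple[int, ...]) -> str:
--     """Reconstruct a display string by inserting spaces at *word_breaks* positions.
--
--     Args:
--         surface: Flat uppercase surface (e.g. ``"DEFACTO"``).
--         word_breaks: Tuple of character indices where spaces should be inserted,
--             as returned by :func:`extract_word_breaks`.
--
--     Returns:
--         The surface with spaces re-inserted (e.g. ``"DE FACTO"``).
--     """
--     if not word_breaks:
--         return surface
--     result: list[str] = []
--     break_set = set(word_breaks)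
--     for i, ch in enumerate(surface):
--         if i in break_set:
--             result.append(" ")
--         result.append(ch)
--     return "".join(result)
-- ===== SOURCE B (Python) =====
-- def display_form(surface: str, word_breaks: tuple[int, ...]) -> str:
--     points = sorted(p for p in set(word_breaks) if 0 <= p < len(surface))
--     segments = []
--     prev = 0
--     for p in points:
--         segments.append(surface[prev:p])
--         prev = p
--     segments.append(surface[prev:])
--     return " ".join(segments)
-- ===== Notes on version B (the rewrite author's own statement) =====
-- stated objective: idiomatic
-- what changed: B replaces A's per-character scan with a set-membership test at every index by computing the sorted valid break points once, slicing the surface into segments at those points and joining them with spaces.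
import Mathlib
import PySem

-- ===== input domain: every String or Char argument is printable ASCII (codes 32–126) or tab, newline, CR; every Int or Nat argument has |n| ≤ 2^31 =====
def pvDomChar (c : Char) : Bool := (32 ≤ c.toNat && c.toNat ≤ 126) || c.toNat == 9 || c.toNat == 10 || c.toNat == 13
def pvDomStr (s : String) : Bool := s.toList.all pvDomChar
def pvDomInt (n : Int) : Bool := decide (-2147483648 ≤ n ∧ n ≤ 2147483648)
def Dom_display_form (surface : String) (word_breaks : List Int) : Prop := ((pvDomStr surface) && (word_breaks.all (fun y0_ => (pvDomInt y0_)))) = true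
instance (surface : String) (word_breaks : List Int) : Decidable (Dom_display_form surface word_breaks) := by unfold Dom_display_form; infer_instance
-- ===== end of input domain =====

-- B replaces A's per-character scan (set-membership test at every index) by computing the
-- sorted valid break points once and slicing the surface into segments joined with spaces;
-- same observable behaviour, a more idiomatic decomposition.

-- ===== PORT A =====
def display_form (surface : String) (word_breaks : List Int) : String :=
  if word_breaks = [] then surface
  else
    let breakSet := PySem.Set.ofList word_breaks
    let result : List Char :=
      (PySem.List.enumerate surface.toList 0).foldl
        (fun acc p =>
          (if PySem.Set.contains breakSet p.1 then acc ++ [' '] else acc) ++ [p.2]) []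
    String.ofList result

-- ===== PORT B =====
def display_form_alt (surface : String) (word_breaks : List Int) : String :=
  let points := PySem.List.sorted
    ((PySem.Set.ofList word_breaks).filter
      (fun p => decide (0 ≤ p ∧ p < PySem.Str.len surface)))
    (fun x => x) false
  let st := points.foldl
    (fun (st : List String × Int) p =>
      (st.1 ++ [PySem.Str.slice surface (some st.2) (some p)], p))
    (([] : List String), (0 : Int))
  PySem.Str.join " " (st.1 ++ [PySem.Str.slice surface (some st.2) none])

-- ===== PRECONDITION & SPEC =====
def Spec_display_form (surface : String) (word_breaks : List Int) (out : String) : Prop := out = display_form_alt surface word_breaks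
instance (surface : String) (word_breaks : List Int) (out : String) : Decidable (Spec_display_form surface word_breaks out) := by unfold Spec_display_form; infer_instance

-- ===== CLAIM (what is proved, stated in full; the proofs are below) =====
def Claim_equal_display_form : Prop := ∀ (surface : String) (word_breaks : List Int), Dom_display_form surface word_breaks → Spec_display_form surface word_breaks (display_form surface word_breaks)

-- ===== LEMMAS AND PROOFS =====

-- A's loop, written as structural recursion over the characters with their index.
def insAux (wb : List Int) : List Char → Nat → List Char
  | [], _ => []
  | c :: cs, i => (if (i : Int) ∈ wb then [' '] else []) ++ c :: insAux wb cs (i + 1)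

-- B's result, written as structural recursion over the (Nat) break points.
def segJoin (s : List Char) : Nat → List Nat → List Char
  | i, [] => s.drop i
  | i, p :: ps => (s.drop i).take (p - i) ++ ' ' :: segJoin s p ps

-- A's foldl over enumerate is insAux.
theorem foldl_enumerate_eq_insAux (wb : List Int) (cs : List Char) (i : Nat) (acc : List Char) :
    (PySem.List.enumerate cs (i : Int)).foldl
      (fun acc p =>
        (if PySem.Set.contains (PySem.Set.ofList wb) p.1 then acc ++ [' '] else acc) ++ [p.2]) acc
      = acc ++ insAux wb cs i := by
  induction cs generalizing i acc with
  | nil => simp [insAux, PySem.List.enumerate_nil]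
  | cons c cs ih =>
    rw [PySem.List.enumerate_cons]
    have : ((i : Int) + 1) = ((i + 1 : Nat) : Int) := by push_cast; ring
    simp only [List.foldl_cons, this, ih]
    by_cases h : (i : Int) ∈ wb
    · simp [insAux, h, pysem]
    · simp [insAux, h, pysem]

-- A segment without break points passes through unchanged.
theorem insAux_no_breaks (wb : List Int) (cs : List Char) (i : Nat)
    (h : ∀ j : Nat, i ≤ j → j < i + cs.length → ((j : Int) ∉ wb)) :
    insAux wb cs i = cs := by
  induction cs generalizing i with
  | nil => rfl
  | cons c cs ih =>
    have h0 : ((i : Int) ∉ wb) := h i le_rfl (by simp)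
    rw [show insAux wb (c :: cs) i
        = (if (i : Int) ∈ wb then [' '] else []) ++ c :: insAux wb cs (i + 1) from rfl,
      if_neg h0]
    simp only [List.nil_append, List.cons.injEq, true_and]
    exact ih (i + 1) (fun j hj hj' => h j (by omega) (by simp at hj' ⊢; omega))

-- insAux distributes over append.
theorem insAux_append (wb : List Int) (cs ds : List Char) (i : Nat) :
    insAux wb (cs ++ ds) i = insAux wb cs i ++ insAux wb ds (i + cs.length) := by
  induction cs generalizing i with
  | nil => simp [insAux]
  | cons c cs ih =>
    simp only [List.cons_append, insAux, ih, List.length_cons]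
    have : i + 1 + cs.length = i + (cs.length + 1) := by omega
    simp [this]

-- head step of segJoin: the segment starting at q < n begins with s[q].
theorem segJoin_head (s : List Char) (q : Nat) (ps : List Nat) (hq : q < s.length)
    (hps : ∀ r ∈ ps, q < r) :
    segJoin s q ps = s[q] :: segJoin s (q + 1) ps := by
  cases ps with
  | nil => simp only [segJoin]; exact List.drop_eq_getElem_cons hq
  | cons r rs =>
    have hr : q < r := hps r (by simp)
    have hm : r - q = (r - (q + 1)) + 1 := by omega
    simp only [segJoin, hm, List.drop_eq_getElem_cons hq, List.take_succ_cons, List.cons_append]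

-- MAIN: on a window [i, n) whose break points are exactly qs (sorted, distinct),
-- A's per-character insertion equals B's segment join.
theorem insAux_eq_segJoin (wb : List Int) (s : List Char) (qs : List Nat) (i : Nat)
    (h1 : qs.Pairwise (· < ·))
    (h2 : ∀ q ∈ qs, i ≤ q ∧ q < s.length)
    (h3 : ∀ j : Nat, i ≤ j → j < s.length → ((j : Int) ∈ wb ↔ j ∈ qs)) :
    insAux wb (s.drop i) i = segJoin s i qs := by
  induction qs generalizing i with
  | nil =>
    simp only [segJoin]
    apply insAux_no_breaks
    intro j hj hj'
    rw [List.length_drop] at hj'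
    have hiff := h3 j hj (by omega)
    simp only [List.not_mem_nil, iff_false] at hiff
    exact hiff
  | cons q qs ih =>
    obtain ⟨hiq, hqn⟩ := h2 q (by simp)
    have hqps : ∀ r ∈ qs, q < r := fun r hr => List.rel_of_pairwise_cons h1 hr
    have hdd : (s.drop i).drop (q - i) = s.drop q := by
      rw [List.drop_drop]; congr 1; omega
    have hsplit : s.drop i = (s.drop i).take (q - i) ++ s.drop q := by
      conv_lhs => rw [← List.take_append_drop (q - i) (s.drop i)]
      rw [hdd]
    have hlen : ((s.drop i).take (q - i)).length = q - i := by
      simp [List.length_take]; omega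
    rw [hsplit, insAux_append, hlen]
    have hfirst : insAux wb ((s.drop i).take (q - i)) i = (s.drop i).take (q - i) := by
      apply insAux_no_breaks
      intro j hj hj'
      rw [hlen] at hj'
      intro hmem
      have hj2 : j < s.length := by omega
      have := (h3 j hj hj2).mp hmem
      rcases List.mem_cons.mp this with h | h
      · omega
      · exact absurd (hqps j h) (by omega)
    have hiqq : i + (q - i) = q := by omega
    rw [hfirst, hiqq]
    have hdq : s.drop q = s[q] :: s.drop (q + 1) := List.drop_eq_getElem_cons hqn
    have hqw : ((q : Int) ∈ wb) := (h3 q hiq hqn).mpr (by simp)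
    have hsecond : insAux wb (s.drop q) q = ' ' :: s[q] :: insAux wb (s.drop (q + 1)) (q + 1) := by
      rw [hdq,
        show insAux wb (s[q] :: s.drop (q + 1)) q
          = (if (q : Int) ∈ wb then [' '] else []) ++ s[q] :: insAux wb (s.drop (q + 1)) (q + 1)
          from rfl,
        if_pos hqw]
      rfl
    rw [hsecond]
    have hrec : insAux wb (s.drop (q + 1)) (q + 1) = segJoin s (q + 1) qs := by
      refine ih (q + 1) h1.of_cons
        (fun r hr => ⟨by have := hqps r hr; omega, (h2 r (by simp [hr])).2⟩) ?_
      intro j hj hj2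
      rw [h3 j (by omega) hj2, List.mem_cons]
      constructor
      · rintro (h | h)
        · omega
        · exact h
      · exact fun hm => Or.inr hm
    rw [hrec]
    simp only [segJoin]
    rw [segJoin_head s q qs hqn hqps]

-- B's loop state after the fold: accumulated segments and the last break point.
def segsOf (surface : String) : Int → List Int → List String
  | _, [] => []
  | prev, p :: ps => PySem.Str.slice surface (some prev) (some p) :: segsOf surface p ps

def lastP : Int → List Int → Int
  | prev, [] => prev
  | _, p :: ps => lastP p ps

theorem foldl_seg (surface : String) (ps : List Int) (segs : List String) (prev : Int) :
    ps.foldl (fun (st : List String × Int) p =>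
        (st.1 ++ [PySem.Str.slice surface (some st.2) (some p)], p)) (segs, prev)
      = (segs ++ segsOf surface prev ps, lastP prev ps) := by
  induction ps generalizing segs prev with
  | nil => simp [segsOf, lastP]
  | cons p ps ih => simp [segsOf, lastP, ih]

theorem join_segsOf (surface : String) (ps : List Int) (prev : Int) (h0 : 0 ≤ prev)
    (hch : List.IsChain (· ≤ ·) (prev :: ps)) :
    PySem.Chars.join [' ']
      ((segsOf surface prev ps ++ [PySem.Str.slice surface (some (lastP prev ps)) none]).map
        String.toList)
      = segJoin surface.toList prev.toNat (ps.map Int.toNat) := by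
  induction ps generalizing prev with
  | nil =>
    simp only [segsOf, lastP, List.nil_append, List.map_cons, List.map_nil,
      PySem.Chars.join_singleton, PySem.Str.toList_slice, PySem.Chars.slice_eq_listSlice]
    rw [PySem.List.slice_from _ h0]
    rfl
  | cons p ps ih =>
    obtain ⟨hp, hch'⟩ := List.isChain_cons_cons.mp hch
    have hp0 : 0 ≤ p := le_trans h0 hp
    simp only [segsOf, lastP, List.cons_append, List.map_cons]
    cases hrest : (segsOf surface p ps ++
        [PySem.Str.slice surface (some (lastP p ps)) none]).map String.toList with
    | nil =>
      exfalso
      have : (segsOf surface p ps ++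
          [PySem.Str.slice surface (some (lastP p ps)) none]).map String.toList ≠ [] := by
        simp
      exact this hrest
    | cons y l =>
      rw [PySem.Chars.join_cons_cons, ← hrest,
        ih p hp0 hch']
      simp only [PySem.Str.toList_slice, PySem.Chars.slice_eq_listSlice]
      rw [PySem.List.slice_toNat _ h0 hp0]
      simp [segJoin, List.append_assoc]

-- B's result, on the character level.
theorem alt_toList (surface : String) (wb : List Int) :
    (display_form_alt surface wb).toList
      = segJoin surface.toList 0
          ((PySem.List.sorted
              ((PySem.Set.ofList wb).filter
                (fun p => decide (0 ≤ p ∧ p < PySem.Str.len surface)))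
              (fun x => x) false).map Int.toNat) := by
  unfold display_form_alt
  simp only [foldl_seg, PySem.Str.toList_join]
  have hsep : (" " : String).toList = [' '] := rfl
  rw [hsep]
  have hmem : ∀ p ∈ PySem.List.sorted
      ((PySem.Set.ofList wb).filter
        (fun p => decide (0 ≤ p ∧ p < PySem.Str.len surface)))
      (fun x => x) false, (0 : Int) ≤ p := by
    intro p hp
    rw [PySem.List.mem_sorted, List.mem_filter] at hp
    have := hp.2
    simp only [decide_eq_true_eq] at this
    exact this.1
  have hpw := PySem.List.sorted_pairwise
    ((PySem.Set.ofList wb).filter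
      (fun p => decide (0 ≤ p ∧ p < PySem.Str.len surface))) (fun x => x)
  have hchain : List.IsChain (· ≤ ·) ((0 : Int) ::
      PySem.List.sorted
        ((PySem.Set.ofList wb).filter
          (fun p => decide (0 ≤ p ∧ p < PySem.Str.len surface)))
        (fun x => x) false) :=
    List.isChain_iff_pairwise.mpr (List.Pairwise.cons hmem hpw)
  have := join_segsOf surface _ 0 le_rfl hchain
  simpa using this

theorem display_form_spec : Claim_equal_display_form := by
  intro surface wb _
  unfold Spec_display_form
  by_cases hwb : wb = []
  · subst hwb
    unfold display_form
    rw [if_pos rfl]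
    refine String.toList_inj.mp ?_
    rw [alt_toList]
    have hpts : (PySem.List.sorted
        ((PySem.Set.ofList ([] : List Int)).filter
          (fun p => decide (0 ≤ p ∧ p < PySem.Str.len surface)))
        (fun x => x) false) = [] := rfl
    rw [hpts]
    simp [segJoin]
  · unfold display_form
    rw [if_neg hwb]
    show String.ofList
        ((PySem.List.enumerate surface.toList 0).foldl
          (fun acc p =>
            (if PySem.Set.contains (PySem.Set.ofList wb) p.1 then acc ++ [' '] else acc) ++ [p.2])
          [])
      = display_form_alt surface wb
    refine String.toList_inj.mp ?_
    rw [String.toList_ofList, alt_toList]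
    have hA : (PySem.List.enumerate surface.toList 0).foldl
        (fun acc p =>
          (if PySem.Set.contains (PySem.Set.ofList wb) p.1 then acc ++ [' '] else acc) ++ [p.2])
        [] = insAux wb surface.toList 0 := by
      have := foldl_enumerate_eq_insAux wb surface.toList 0 []
      simpa using this
    rw [hA]
    set P : List Int := PySem.List.sorted
        ((PySem.Set.ofList wb).filter
          (fun p => decide (0 ≤ p ∧ p < PySem.Str.len surface)))
        (fun x => x) false with hP
    have hmemP : ∀ x, x ∈ P ↔ x ∈ wb ∧ 0 ≤ x ∧ x < (surface.toList.length : Int) := by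
      intro x
      rw [hP, PySem.List.mem_sorted, List.mem_filter, PySem.Set.mem_ofList]
      simp [PySem.Str.len_eq]
    have hndP : P.Nodup :=
      (PySem.List.sorted_perm _ _ _).symm.nodup ((PySem.Set.nodup_ofList wb).filter _)
    have hpwP : P.Pairwise (· < ·) := by
      have h1 := PySem.List.sorted_pairwise
        ((PySem.Set.ofList wb).filter
          (fun p => decide (0 ≤ p ∧ p < PySem.Str.len surface))) (fun x => x)
      rw [← hP] at h1
      exact (h1.and hndP).imp (fun h => lt_of_le_of_ne h.1 h.2)
    have h1q : (P.map Int.toNat).Pairwise (· < ·) := by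
      rw [List.pairwise_map]
      refine List.Pairwise.imp_of_mem ?_ hpwP
      intro a b ha hb hlt
      have h1 := (hmemP a).mp ha
      have h2 := (hmemP b).mp hb
      omega
    have h2q : ∀ q ∈ P.map Int.toNat, 0 ≤ q ∧ q < surface.toList.length := by
      intro q hq
      rcases List.mem_map.mp hq with ⟨x, hx, rfl⟩
      have h1 := (hmemP x).mp hx
      exact ⟨Nat.zero_le _, by omega⟩
    have h3q : ∀ j : Nat, 0 ≤ j → j < surface.toList.length →
        ((j : Int) ∈ wb ↔ j ∈ P.map Int.toNat) := by
      intro j _ hj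
      constructor
      · intro hw
        have hmem : (j : Int) ∈ P :=
          (hmemP _).mpr ⟨hw, Int.natCast_nonneg j, by exact_mod_cast hj⟩
        exact List.mem_map.mpr ⟨_, hmem, by simp⟩
      · intro hq
        rcases List.mem_map.mp hq with ⟨x, hx, hxe⟩
        have hmx := (hmemP x).mp hx
        have hxj : x = (j : Int) := by omega
        rw [← hxj]
        exact hmx.1
    have hmain := insAux_eq_segJoin wb surface.toList (P.map Int.toNat) 0 h1q h2q h3q
    rw [List.drop_zero] at hmain
    exact hmain
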